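-- pv_equiv track=rewrite | github.com/CQCL/pytket-dqc | src/pytket_dqc/distributors/annealing.py | order_reducing_size
-- ===== SOURCE A (Python) =====
-- def order_reducing_size(
--     server_qubits: dict[int, list[int]]
-- ) -> dict[int, list[int]]:
--
--     # List of servers whose position in a ranking by size is unknown
--     position_unknown = list(server_qubits.keys())
--
--     # The order of the servers by their size
--     order = []
--
--     # Look through the list of servers n-1 times, where n is the number of
--     # servers, for the largest. Add the largest found to the order list.
--     for _ in range(len(server_qubits)-1):
--         # Initialise with largest at start of list of servers with unknown
--         # position in the order by size.
--         largest_i = 0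
--         largest = position_unknown[largest_i]
--
--         # For each server with unknown position, check if it is the largest.
--         for i, server in enumerate(position_unknown[1:]):
--             if len(server_qubits[largest]) < len(server_qubits[server]):
--                 largest = server
--                 largest_i = i + 1
--
--         # Append the largest found to the order list, and remove it from the
--         # list of servers with unknown position.
--         order.append(largest)
--         position_unknown.pop(largest_i)
--
--     # Add the remaining server to the order. Only one will remain.
--     order.append(position_unknown[0])
--
--     return {server: server_qubits[server] for server in order}
-- ===== SOURCE B (Python) =====
-- def order_reducing_size(
--     server_qubits: dict[int, list[int]]
-- ) -> dict[int, list[int]]: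
--     # Group servers by qubit-count, then emit the groups in decreasing size;
--     # within a group the original insertion order is kept (A's stable tie-break).
--     groups: dict[int, list[int]] = {}
--     for server, qubits in server_qubits.items():
--         groups.setdefault(len(qubits), []).append(server)
--     return {server: server_qubits[server]
--             for size in sorted(groups, reverse=True)
--             for server in groups[size]}
-- ===== Notes on version B (the rewrite author's own statement) =====
-- stated objective: faster
-- what changed: Replaces A's quadratic repeated first-maximum selection scan with a single hash-grouping pass by qubit-count followed by one sort of the distinct sizes.
import Mathlib
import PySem

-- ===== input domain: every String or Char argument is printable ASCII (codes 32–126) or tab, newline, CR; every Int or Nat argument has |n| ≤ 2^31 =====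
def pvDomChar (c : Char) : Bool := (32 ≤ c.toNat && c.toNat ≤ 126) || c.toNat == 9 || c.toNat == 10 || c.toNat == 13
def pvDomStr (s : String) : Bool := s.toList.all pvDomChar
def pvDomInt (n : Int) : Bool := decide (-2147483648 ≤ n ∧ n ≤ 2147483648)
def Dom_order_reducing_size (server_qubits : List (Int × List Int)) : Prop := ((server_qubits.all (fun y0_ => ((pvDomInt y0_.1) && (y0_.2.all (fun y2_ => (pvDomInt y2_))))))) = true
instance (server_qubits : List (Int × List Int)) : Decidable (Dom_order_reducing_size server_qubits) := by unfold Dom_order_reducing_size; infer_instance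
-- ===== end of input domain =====

-- B replaces A's quadratic repeated first-maximum scan by one hash-grouping pass
-- over the servers by qubit-count plus a single sort of the distinct counts
-- (objective: faster); return-value equivalence only (neither side mutates input).

-- ===== PORT A =====
-- inner loop: for i, server in enumerate(position_unknown[1:]): …  (state = (largest, largest_i))
def pvFindLargest (sq : List (Int × List Int)) (pu : List Int) : Int × Int :=
  match pu with
  | [] => (0, 0)  -- unreachable when A returns: `position_unknown[largest_i]` would raise IndexError (Pre_ excludes the empty dict)
  | p0 :: rest =>
    (PySem.List.enumerate rest 0).foldl
      (fun st p =>
        if ((PySem.Dict.mk sq).getD st.1 []).length < ((PySem.Dict.mk sq).getD p.2 []).length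
        then (p.2, p.1 + 1) else st)
      (p0, 0)

-- outer loop: for _ in range(len(server_qubits)-1): …  (state = (position_unknown, order))
def pvSelLoop (sq : List (Int × List Int)) : Nat → List Int × List Int → List Int × List Int
  | 0, st => st
  | k+1, st =>
    let m := pvFindLargest sq st.1
    pvSelLoop sq k
      ((match PySem.List.pop? st.1 m.2 with | some r => r.2 | none => st.1),  -- position_unknown.pop(largest_i)
       st.2 ++ [m.1])

def order_reducing_size (server_qubits : List (Int × List Int)) : List (Int × List Int) :=
  let d := PySem.Dict.mk server_qubits
  let st := pvSelLoop server_qubits (d.size - 1) (d.keys, [])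
  -- order.append(position_unknown[0]) — raises IndexError iff the dict was empty (excluded by Pre_)
  let order := st.2 ++ (match PySem.List.pyGet? st.1 0 with | some p => [p] | none => [])
  order.map (fun s => (s, d.getD s []))

-- ===== PORT B =====
def order_reducing_size_alt (server_qubits : List (Int × List Int)) : List (Int × List Int) :=
  let d := PySem.Dict.mk server_qubits
  -- groups.setdefault(len(qubits), []).append(server)
  let groups := d.items.foldl
    (fun g p => g.modify ((p.2.length : Int)) [] (fun l => l ++ [p.1]))
    (PySem.Dict.empty)
  let order := (PySem.List.sorted groups.keys (fun x => x) true).flatMap (fun size => groups.getD size [])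
  order.map (fun s => (s, d.getD s []))

-- ===== PRECONDITION & SPEC =====
-- Pre_ excludes the empty dict (A raises IndexError there); the Nodup conjunct only states
-- what the Python dict type already guarantees (a dict cannot carry duplicate keys).
def Pre_order_reducing_size (server_qubits : List (Int × List Int)) : Prop :=
  server_qubits ≠ [] ∧ (server_qubits.map Prod.fst).Nodup
instance (server_qubits : List (Int × List Int)) : Decidable (Pre_order_reducing_size server_qubits) := by unfold Pre_order_reducing_size; infer_instance
def pvWitness_order_reducing_size : (List (Int × List Int)) := [(3, [1, 2]), (7, []), (5, [0, 4])]

def Spec_order_reducing_size (server_qubits : List (Int × List Int)) (out : List (Int × List Int)) : Prop := out = order_reducing_size_alt server_qubits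
instance (server_qubits : List (Int × List Int)) (out : List (Int × List Int)) : Decidable (Spec_order_reducing_size server_qubits out) := by unfold Spec_order_reducing_size; infer_instance

-- ===== CLAIM (what is proved, stated in full; the proofs are below) =====
def Claim_equal_order_reducing_size : Prop := ∀ (server_qubits : List (Int × List Int)), Dom_order_reducing_size server_qubits → Pre_order_reducing_size server_qubits → Spec_order_reducing_size server_qubits (order_reducing_size server_qubits)

-- ===== LEMMAS AND PROOFS =====

-- the qubit-count of a server, and the ranking relation both orders satisfy:
-- strictly more qubits first, ties by original (insertion) position
def pvF (sq : List (Int × List Int)) (s : Int) : Nat := ((PySem.Dict.mk sq).getD s []).length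
def pvRel (sq : List (Int × List Int)) (a b : Int) : Prop :=
  pvF sq b < pvF sq a ∨ (pvF sq a = pvF sq b ∧ (sq.map Prod.fst).idxOf a < (sq.map Prod.fst).idxOf b)

theorem pvRel_antisymm (sq : List (Int × List Int)) (a b : Int) :
    pvRel sq a b → pvRel sq b a → a = b := by
  rintro (h | ⟨h1, h2⟩) (h' | ⟨h1', h2'⟩) <;> omega

theorem pvFold_aux (sq : List (Int × List Int)) :
    ∀ (rest : List Int) (s m0 i0 : Int),
      (((PySem.List.enumerate rest s).foldl
        (fun st p =>
          if ((PySem.Dict.mk sq).getD st.1 []).length < ((PySem.Dict.mk sq).getD p.2 []).length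
          then (p.2, p.1 + 1) else st) (m0, i0)) = (m0, i0) ∧ ∀ x ∈ rest, pvF sq x ≤ pvF sq m0)
      ∨ ∃ k : Nat, ∃ hk : k < rest.length,
          (((PySem.List.enumerate rest s).foldl
            (fun st p =>
              if ((PySem.Dict.mk sq).getD st.1 []).length < ((PySem.Dict.mk sq).getD p.2 []).length
              then (p.2, p.1 + 1) else st) (m0, i0)) = (rest[k], s + k + 1)) ∧
          pvF sq m0 < pvF sq rest[k] ∧
          (∀ j (hj : j < rest.length), j < k → pvF sq rest[j] < pvF sq rest[k]) ∧
          (∀ j (hj : j < rest.length), pvF sq rest[j] ≤ pvF sq rest[k]) := by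
  intro rest
  induction rest with
  | nil => intro s m0 i0; left; simp [PySem.List.enumerate]
  | cons a rest' ih =>
    intro s m0 i0
    rw [PySem.List.enumerate_cons]
    simp only [List.foldl_cons]
    by_cases hFa : ((PySem.Dict.mk sq).getD m0 []).length < ((PySem.Dict.mk sq).getD a []).length
    · rw [if_pos hFa]
      rcases ih (s+1) a (s+1) with ⟨heq, hall⟩ | ⟨k', hk', heq, hlt, hfirst, hle⟩
      · right
        refine ⟨0, by simp, ?_, ?_, ?_, ?_⟩
        · simpa using heq
        · simpa [pvF] using hFa
        · intro j hj hj0; omega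
        · intro j hj
          match j, hj with
          | 0, _ => exact le_refl _
          | j'+1, hj =>
            have hj' : j' < rest'.length := by simpa using hj
            simp only [List.getElem_cons_succ, List.getElem_cons_zero]
            exact hall _ (List.getElem_mem hj')
      · right
        refine ⟨k'+1, by simpa using Nat.succ_lt_succ hk', ?_, ?_, ?_, ?_⟩
        · rw [heq]; simp; ring_nf
        · simp only [List.getElem_cons_succ]
          exact lt_trans hFa hlt
        · intro j hj hjk
          match j, hj with
          | 0, _ =>
            simp only [List.getElem_cons_zero, List.getElem_cons_succ]
            exact hlt
          | j'+1, hj => simpa using hfirst j' (by simpa using hj) (by omega)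
        · intro j hj
          match j, hj with
          | 0, _ =>
            simp only [List.getElem_cons_zero, List.getElem_cons_succ]
            exact le_of_lt hlt
          | j'+1, hj => simpa using hle j' (by simpa using hj)
    · rw [if_neg hFa]
      rcases ih (s+1) m0 i0 with ⟨heq, hall⟩ | ⟨k', hk', heq, hlt, hfirst, hle⟩
      · left
        refine ⟨heq, ?_⟩
        intro x hx
        rcases List.mem_cons.1 hx with rfl | hx
        · simpa [pvF] using Nat.le_of_not_lt hFa
        · exact hall x hx
      · right
        refine ⟨k'+1, by simpa using Nat.succ_lt_succ hk', ?_, ?_, ?_, ?_⟩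
        · rw [heq]; simp; ring_nf
        · simpa using hlt
        · intro j hj hjk
          match j, hj with
          | 0, _ =>
            simp only [List.getElem_cons_zero, List.getElem_cons_succ]
            exact lt_of_le_of_lt (Nat.le_of_not_lt hFa) hlt
          | j'+1, hj => simpa using hfirst j' (by simpa using hj) (by omega)
        · intro j hj
          match j, hj with
          | 0, _ =>
            simp only [List.getElem_cons_zero, List.getElem_cons_succ]
            exact le_of_lt (lt_of_le_of_lt (Nat.le_of_not_lt hFa) hlt)
          | j'+1, hj => simpa using hle j' (by simpa using hj)

theorem pvFindLargest_spec (sq : List (Int × List Int)) (pu : List Int) (hne : pu ≠ []) :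
    ∃ k : Nat, ∃ hk : k < pu.length,
      pvFindLargest sq pu = (pu[k], (k : Int)) ∧
      (∀ j (hj : j < pu.length), j < k → pvF sq pu[j] < pvF sq pu[k]) ∧
      (∀ j (hj : j < pu.length), pvF sq pu[j] ≤ pvF sq pu[k]) := by
  match pu with
  | [] => exact absurd rfl hne
  | p0 :: rest =>
    show ∃ k : Nat, ∃ hk : k < (p0 :: rest).length, _ ∧ _ ∧ _
    rcases pvFold_aux sq rest 0 p0 0 with ⟨heq, hall⟩ | ⟨k', hk', heq, hlt, hfirst, hle⟩
    · refine ⟨0, by simp, ?_, ?_, ?_⟩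
      · simpa [pvFindLargest] using heq
      · intro j hj hj0; omega
      · intro j hj
        match j, hj with
        | 0, _ => exact le_refl _
        | j'+1, hj =>
          have hj' : j' < rest.length := by simpa using hj
          simp only [List.getElem_cons_succ, List.getElem_cons_zero]
          exact hall _ (List.getElem_mem hj')
    · refine ⟨k'+1, by simpa using Nat.succ_lt_succ hk', ?_, ?_, ?_⟩
      · show (PySem.List.enumerate rest 0).foldl _ (p0, 0) = _
        rw [heq]
        simp only [List.getElem_cons_succ]
        congr 1
        push_cast
        ring
      · intro j hj hjk
        match j, hj with
        | 0, _ =>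
          simp only [List.getElem_cons_zero, List.getElem_cons_succ]
          exact hlt
        | j'+1, hj => simpa using hfirst j' (by simpa using hj) (by omega)
      · intro j hj
        match j, hj with
        | 0, _ =>
          simp only [List.getElem_cons_zero, List.getElem_cons_succ]
          exact le_of_lt hlt
        | j'+1, hj => simpa using hle j' (by simpa using hj)

theorem pv_idx_pairwise (l keys : List Int) (h : l.Sublist keys) (hn : keys.Nodup) :
    l.Pairwise (fun a b => keys.idxOf a < keys.idxOf b) := by
  refine List.Pairwise.sublist h ?_
  rw [List.pairwise_iff_getElem]
  intro i j hi hj hij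
  rw [List.Nodup.idxOf_getElem hn i hi, List.Nodup.idxOf_getElem hn j hj]
  exact hij

theorem pvRel_of_firstmax (sq : List (Int × List Int)) (hnd : (sq.map Prod.fst).Nodup)
    (pu : List Int) (hsub : pu.Sublist (sq.map Prod.fst)) (k : Nat) (hk : k < pu.length)
    (hfirst : ∀ j (hj : j < pu.length), j < k → pvF sq pu[j] < pvF sq pu[k])
    (hle : ∀ j (hj : j < pu.length), pvF sq pu[j] ≤ pvF sq pu[k]) :
    ∀ x ∈ pu.eraseIdx k, pvRel sq pu[k] x := by
  have hpw := pv_idx_pairwise pu (sq.map Prod.fst) hsub hnd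
  rw [List.pairwise_iff_getElem] at hpw
  intro x hx
  rcases List.getElem_of_mem hx with ⟨j, hj, rfl⟩
  rw [List.getElem_eraseIdx hj]
  split_ifs with hjk
  · exact Or.inl (hfirst j (lt_of_lt_of_le hj (by rw [List.length_eraseIdx, if_pos hk]; omega)) hjk)
  · have hj1 : j + 1 < pu.length := by rw [List.length_eraseIdx, if_pos hk] at hj; omega
    rcases lt_or_eq_of_le (hle (j+1) hj1) with hlt | heqF
    · exact Or.inl hlt
    · exact Or.inr ⟨heqF.symm, hpw k (j+1) hk hj1 (by omega)⟩

theorem pv_perm_cons_eraseIdx (pu : List Int) (k : Nat) (hk : k < pu.length) :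
    pu.Perm (pu[k] :: pu.eraseIdx k) := by
  conv_lhs => rw [← List.take_append_drop k pu, ← List.getElem_cons_drop hk]
  rw [List.eraseIdx_eq_take_drop_succ]
  exact List.perm_middle

theorem pvSelLoop_spec (sq : List (Int × List Int)) (hnd : (sq.map Prod.fst).Nodup) :
    ∀ (fuel : Nat) (pu order : List Int), pu.Sublist (sq.map Prod.fst) → fuel < pu.length →
      ∃ t rem, pvSelLoop sq fuel (pu, order) = (rem, order ++ t) ∧
        (t ++ rem).Perm pu ∧ rem.length + fuel = pu.length ∧
        List.Pairwise (pvRel sq) t ∧ (∀ a ∈ t, ∀ b ∈ rem, pvRel sq a b) := by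
  intro fuel
  induction fuel with
  | zero =>
    intro pu order hsub hlen
    exact ⟨[], pu, by simp [pvSelLoop], by simp, by simp, by simp, by simp⟩
  | succ f ih =>
    intro pu order hsub hlen
    have hne : pu ≠ [] := by intro h; rw [h] at hlen; simp at hlen
    rcases pvFindLargest_spec sq pu hne with ⟨k, hk, heq, hfirst, hle⟩
    have hpop : PySem.List.pop? pu (k : Int) = some (pu[k], pu.eraseIdx k) :=
      PySem.List.pop?_natCast pu k hk
    have hlen' : (pu.eraseIdx k).length = pu.length - 1 := by
      rw [List.length_eraseIdx, if_pos hk]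
    have hsub' : (pu.eraseIdx k).Sublist (sq.map Prod.fst) :=
      (List.eraseIdx_sublist pu k).trans hsub
    rcases ih (pu.eraseIdx k) (order ++ [pu[k]]) hsub' (by omega) with
      ⟨t', rem', hrun, hperm, hlen'', hpw, hcross⟩
    have hrel : ∀ x ∈ pu.eraseIdx k, pvRel sq pu[k] x :=
      pvRel_of_firstmax sq hnd pu hsub k hk hfirst hle
    refine ⟨pu[k] :: t', rem', ?_, ?_, by omega, ?_, ?_⟩
    · show pvSelLoop sq f _ = _
      rw [heq]
      simp only [hpop]
      rw [hrun]
      simp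
    · exact (List.Perm.cons _ hperm).trans (pv_perm_cons_eraseIdx pu k hk).symm
    · refine List.pairwise_cons.2 ⟨?_, hpw⟩
      intro b hb
      exact hrel b (hperm.subset (List.mem_append_left _ hb))
    · intro a ha b hb
      rcases List.mem_cons.1 ha with rfl | ha
      · exact hrel b (hperm.subset (List.mem_append_right _ hb))
      · exact hcross a ha b hb

-- B's bucket contents and bucket keys
theorem pv_groups_getD_aux (l : List (Int × List Int)) :
    ∀ (g : PySem.Dict Int (List Int)) (L : Int),
      ((l.foldl (fun g p => g.modify ((p.2.length : Int)) [] (fun t => t ++ [p.1])) g).getD L [])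
        = g.getD L [] ++ (l.filter (fun p => (p.2.length : Int) == L)).map Prod.fst := by
  induction l with
  | nil => intro g L; simp
  | cons p l ih =>
    intro g L
    simp only [List.foldl_cons, List.filter_cons]
    rw [ih]
    by_cases hL : (p.2.length : Int) = L
    · simp [PySem.Dict.modify, hL]
    · simp [PySem.Dict.modify, PySem.Dict.getD_insert, hL, Ne.symm hL]

theorem pv_groups_getD (sq : List (Int × List Int)) (L : Int) :
    ((sq.foldl (fun g p => g.modify ((p.2.length : Int)) [] (fun l => l ++ [p.1])) PySem.Dict.empty).getD L [])
      = (sq.filter (fun p => (p.2.length : Int) == L)).map Prod.fst := by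
  rw [pv_groups_getD_aux]
  simp [PySem.Dict.getD_empty]

-- every member of a bucket is a key whose qubit-count is that bucket's size
theorem pv_bucket_F (sq : List (Int × List Int)) (hnd : (sq.map Prod.fst).Nodup) (L : Int)
    (x : Int) (hx : x ∈ (sq.filter (fun p => (p.2.length : Int) == L)).map Prod.fst) :
    ((pvF sq x : Int) = L) ∧ x ∈ sq.map Prod.fst := by
  rcases List.mem_map.1 hx with ⟨p, hp, rfl⟩
  rcases List.mem_filter.1 hp with ⟨hpsq, hplen⟩
  have hitems : (p.1, p.2) ∈ (PySem.Dict.mk sq).items := by simpa using hpsq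
  have hkeys : (PySem.Dict.mk sq).keys.Nodup := by
    simpa [PySem.Dict.keys] using hnd
  have := PySem.Dict.getD_of_mem_items (PySem.Dict.mk sq) hitems hkeys ([] : List Int)
  refine ⟨?_, List.mem_map.2 ⟨p, hpsq, rfl⟩⟩
  rw [pvF, this]
  exact of_decide_eq_true hplen

theorem pv_groups_keys (sq : List (Int × List Int)) :
    ((sq.foldl (fun g p => g.modify ((p.2.length : Int)) [] (fun l => l ++ [p.1])) PySem.Dict.empty).keys)
      = PySem.Set.ofList (sq.map (fun p => (p.2.length : Int))) := by
  have h := PySem.Dict.keys_foldl_modify_key sq (fun p => ((p.2.length : Int)))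
    ([] : List Int) (fun _ p => fun t => t ++ [p.1]) PySem.Dict.empty
  rw [h, PySem.Dict.keys_empty]
  rfl

theorem pvS_nodup (sq : List (Int × List Int)) :
    (PySem.List.sorted (PySem.Set.ofList (sq.map (fun p => (p.2.length : Int)))) (fun x => x) true).Nodup :=
  (List.Perm.nodup_iff
    (PySem.List.sorted_perm (PySem.Set.ofList (sq.map (fun p => (p.2.length : Int)))) (fun x => x) true)).2
    (PySem.Set.nodup_ofList _)

theorem pv_bucket_nodup (sq : List (Int × List Int)) (hnd : (sq.map Prod.fst).Nodup) (L : Int) :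
    ((sq.filter (fun p => (p.2.length : Int) == L)).map Prod.fst).Nodup :=
  hnd.sublist (List.Sublist.map Prod.fst (List.filter_sublist))

theorem pvB_order_perm (sq : List (Int × List Int)) (hnd : (sq.map Prod.fst).Nodup) :
    ((PySem.List.sorted (PySem.Set.ofList (sq.map (fun p => (p.2.length : Int)))) (fun x => x) true).flatMap
      (fun L => (sq.filter (fun p => (p.2.length : Int) == L)).map Prod.fst)).Perm (sq.map Prod.fst) := by
  have hSnd := pvS_nodup sq
  have hflat : ((PySem.List.sorted (PySem.Set.ofList (sq.map (fun p => (p.2.length : Int)))) (fun x => x) true).flatMap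
      (fun L => (sq.filter (fun p => (p.2.length : Int) == L)).map Prod.fst)).Nodup := by
    rw [List.nodup_flatMap]
    refine ⟨fun L _ => pv_bucket_nodup sq hnd L, ?_⟩
    refine hSnd.imp_of_mem ?_
    intro L1 L2 _ _ hne12 x hx1 hx2
    have h1 := pv_bucket_F sq hnd L1 x hx1
    have h2 := pv_bucket_F sq hnd L2 x hx2
    exact hne12 (h1.1 ▸ h2.1 ▸ rfl)
  rw [List.perm_ext_iff_of_nodup hflat hnd]
  intro a
  constructor
  · intro ha
    rcases List.mem_flatMap.1 ha with ⟨L, _, hbucket⟩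
    exact (pv_bucket_F sq hnd L a hbucket).2
  · intro ha
    rcases List.mem_map.1 ha with ⟨p, hp, rfl⟩
    refine List.mem_flatMap.2 ⟨(p.2.length : Int), ?_, ?_⟩
    · rw [PySem.List.mem_sorted, PySem.Set.mem_ofList]
      exact List.mem_map.2 ⟨p, hp, rfl⟩
    · exact List.mem_map.2 ⟨p, List.mem_filter.2 ⟨hp, by simp⟩, rfl⟩

theorem pvB_order_pairwise (sq : List (Int × List Int)) (hnd : (sq.map Prod.fst).Nodup) :
    List.Pairwise (pvRel sq)
      ((PySem.List.sorted (PySem.Set.ofList (sq.map (fun p => (p.2.length : Int)))) (fun x => x) true).flatMap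
        (fun L => (sq.filter (fun p => (p.2.length : Int) == L)).map Prod.fst)) := by
  rw [List.pairwise_flatMap]
  constructor
  · -- within a bucket: equal qubit-counts, original order kept
    intro L _
    have hsub : ((sq.filter (fun p => (p.2.length : Int) == L)).map Prod.fst).Sublist (sq.map Prod.fst) :=
      List.Sublist.map Prod.fst (List.filter_sublist)
    have hidx := pv_idx_pairwise _ (sq.map Prod.fst) hsub hnd
    refine hidx.imp_of_mem ?_
    intro a b ha hb hab
    exact Or.inr ⟨by
      have h1 := (pv_bucket_F sq hnd L a ha).1
      have h2 := (pv_bucket_F sq hnd L b hb).1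
      omega, hab⟩
  · -- across buckets: the sizes strictly decrease
    have hge := PySem.List.sorted_pairwise_rev (PySem.Set.ofList (sq.map (fun p => (p.2.length : Int)))) (fun x => x)
    have hnd' := pvS_nodup sq
    have hgt := hge.and hnd'
    refine hgt.imp ?_
    rintro L1 L2 ⟨hle, hne⟩ a ha b hb
    have h1 := (pv_bucket_F sq hnd L1 a ha).1
    have h2 := (pv_bucket_F sq hnd L2 b hb).1
    exact Or.inl (by omega)

theorem pv_main (sq : List (Int × List Int)) (hne : sq ≠ []) (hnd : (sq.map Prod.fst).Nodup) :
    order_reducing_size sq = order_reducing_size_alt sq := by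
  have hlen : 0 < sq.length := List.length_pos_iff.2 hne
  -- run A's selection loop
  obtain ⟨t, rem, hrun, hperm, hlenr, hpwt, hcross⟩ :=
    pvSelLoop_spec sq hnd (sq.length - 1) (sq.map Prod.fst) [] (List.Sublist.refl _)
      (by rw [List.length_map]; omega)
  rw [List.length_map] at hlenr
  obtain ⟨r0, hrem⟩ := List.length_eq_one_iff.1 (by omega : rem.length = 1)
  subst hrem
  -- A's return value
  have hA : order_reducing_size sq
      = (t ++ [r0]).map (fun s => (s, (PySem.Dict.mk sq).getD s [])) := by
    show (((pvSelLoop sq (sq.length - 1) (sq.map Prod.fst, [])).2 ++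
        (match PySem.List.pyGet? (pvSelLoop sq (sq.length - 1) (sq.map Prod.fst, [])).1 0 with
          | some p => [p] | none => [])).map (fun s => (s, (PySem.Dict.mk sq).getD s []))) = _
    rw [hrun]
    rfl
  -- B's return value
  have hg2 : (fun L => ((sq.foldl (fun g p => g.modify ((p.2.length : Int)) [] (fun l => l ++ [p.1]))
      PySem.Dict.empty).getD L []))
      = fun L => (sq.filter (fun p => (p.2.length : Int) == L)).map Prod.fst :=
    funext (pv_groups_getD sq)
  have hB : order_reducing_size_alt sq
      = ((PySem.List.sorted (PySem.Set.ofList (sq.map (fun p => (p.2.length : Int)))) (fun x => x) true).flatMap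
          (fun L => (sq.filter (fun p => (p.2.length : Int) == L)).map Prod.fst)).map
          (fun s => (s, (PySem.Dict.mk sq).getD s [])) := by
    show (((PySem.List.sorted ((sq.foldl (fun g p => g.modify ((p.2.length : Int)) [] (fun l => l ++ [p.1]))
        PySem.Dict.empty).keys) (fun x => x) true).flatMap
        (fun size => ((sq.foldl (fun g p => g.modify ((p.2.length : Int)) [] (fun l => l ++ [p.1]))
        PySem.Dict.empty).getD size []))).map (fun s => (s, (PySem.Dict.mk sq).getD s []))) = _
    rw [pv_groups_keys sq, hg2]
  -- the two orders coincide
  have hpwA : List.Pairwise (pvRel sq) (t ++ [r0]) := by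
    rw [List.pairwise_append]
    exact ⟨hpwt, List.pairwise_singleton _ _,
      fun a ha b hb => (List.mem_singleton.1 hb) ▸ hcross a ha r0 (List.mem_singleton.2 rfl)⟩
  have hEq : t ++ [r0]
      = (PySem.List.sorted (PySem.Set.ofList (sq.map (fun p => (p.2.length : Int)))) (fun x => x) true).flatMap
          (fun L => (sq.filter (fun p => (p.2.length : Int) == L)).map Prod.fst) :=
    (hperm.trans (pvB_order_perm sq hnd).symm).eq_of_pairwise
      (fun a b _ _ => pvRel_antisymm sq a b) hpwA (pvB_order_pairwise sq hnd)
  rw [hA, hB, hEq]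

-- ===== VERDICT (by name: the statement is the Claim_ definition above) =====
theorem order_reducing_size_spec : Claim_equal_order_reducing_size := by
  intro sq _ hpre
  show order_reducing_size sq = order_reducing_size_alt sq
  exact pv_main sq hpre.1 hpre.2
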